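-- pv_equiv track=rewrite | github.com/nesl/AutoGrader | embed_grader/serapis/forms/assignment_forms.py | _parse_schema_string
-- ===== SOURCE A (Python) =====
-- import string
--
-- def _parse_schema_string(schema_str):
--     schema_name_list = [s.strip().lower() for s in schema_str.split(';')]
--     schema_name_list = [s for s in schema_name_list if s]  # remove empty strings
--     idx = 1
--     while idx < len(schema_name_list):
--         if schema_name_list[idx] in schema_name_list[:idx]:
--             schema_name_list.pop(idx)
--         else:
--             idx += 1
--
--     qualified_chars = string.digits + string.ascii_lowercase + '_.'
--
--     # if not all the schema name are composed only by letters, digits, and underscores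
--     if not all([all([(c in qualified_chars) for c in s]) for s in schema_name_list]):
--         return None
--     return schema_name_list
-- ===== SOURCE B (Python) =====
-- import string
--
-- def _parse_schema_string(schema_str):
--     # Single pass: normalize, skip empties/duplicates, validate, accumulate.
--     qualified_chars = string.digits + string.ascii_lowercase + '_.'
--     seen = set()
--     result = []
--     for token in schema_str.split(';'):
--         name = token.strip().lower()
--         if not name or name in seen:
--             continue
--         seen.add(name)
--         for c in name:
--             if c not in qualified_chars:
--                 return None
--         result.append(name)
--     return result
-- ===== Notes on version B (the rewrite author's own statement) =====
-- stated objective: simpler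
-- what changed: Replaces A's four separate passes (normalize list, filter empties, quadratic pop-based while-loop dedup, nested all() validation) with one accumulating loop over the split tokens that keeps a seen-set and returns None on the first invalid character.
import Mathlib
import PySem

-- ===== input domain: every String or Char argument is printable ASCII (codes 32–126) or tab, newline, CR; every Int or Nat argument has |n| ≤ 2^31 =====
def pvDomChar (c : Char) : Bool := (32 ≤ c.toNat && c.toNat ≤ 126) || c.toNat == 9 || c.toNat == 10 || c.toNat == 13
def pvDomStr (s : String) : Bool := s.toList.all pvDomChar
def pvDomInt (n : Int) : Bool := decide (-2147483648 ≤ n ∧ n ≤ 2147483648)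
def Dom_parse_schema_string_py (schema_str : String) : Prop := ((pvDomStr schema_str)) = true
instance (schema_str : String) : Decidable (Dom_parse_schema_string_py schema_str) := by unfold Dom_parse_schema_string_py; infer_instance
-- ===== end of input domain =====

-- B fuses A's four passes (normalize / filter / quadratic pop-dedup / validate) into one
-- accumulating loop with a seen-set; same return value everywhere (objective: simpler).

-- qualified_chars = string.digits + string.ascii_lowercase + '_.'
def pvQualifiedChars : List Char := "0123456789abcdefghijklmnopqrstuvwxyz_.".toList

-- s.strip().lower()
def pvNorm (s : String) : String := PySem.Str.lower (PySem.Str.strip s)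

-- ===== PORT A =====
-- the while-loop: pop duplicates in place, else advance idx (measure: len - idx)
def pvLoopA (lst : List String) (idx : Nat) : List String :=
  if h : idx < lst.length then
    if (lst.take idx).contains lst[idx] then pvLoopA (lst.eraseIdx idx) idx
    else pvLoopA lst (idx + 1)
  else lst
termination_by lst.length - idx
decreasing_by
  · simp [List.length_eraseIdx, h]; omega
  · omega

def parse_schema_string_py (schema_str : String) : Option (List String) :=
  -- schema_str.split(';'): sep is the nonempty literal ";", so split? never returns none
  let schema_name_list := ((PySem.Str.split? schema_str ";").getD []).map pvNorm
  let schema_name_list := schema_name_list.filter (fun s => !(s == ""))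
  let schema_name_list := pvLoopA schema_name_list 1
  if !(schema_name_list.all (fun s => s.toList.all (fun c => pvQualifiedChars.contains c))) then
    none
  else
    some schema_name_list

-- ===== PORT B =====
def pvLoopB : List String → PySem.Set String → List String → Option (List String)
  | [], _, result => some result
  | token :: ts, seen, result =>
    let name := pvNorm token
    if name == "" || PySem.Set.contains seen name then pvLoopB ts seen result
    else
      let seen' := PySem.Set.add seen name
      if name.toList.all (fun c => pvQualifiedChars.contains c) then
        pvLoopB ts seen' (result ++ [name])
      else none

def parse_schema_string_py_alt (schema_str : String) : Option (List String) :=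
  pvLoopB ((PySem.Str.split? schema_str ";").getD []) PySem.Set.empty []

-- ===== PRECONDITION & SPEC =====
def Spec_parse_schema_string_py (schema_str : String) (out : Option (List String)) : Prop := out = parse_schema_string_py_alt schema_str
instance (schema_str : String) (out : Option (List String)) : Decidable (Spec_parse_schema_string_py schema_str out) := by unfold Spec_parse_schema_string_py; infer_instance

-- ===== CLAIM (what is proved, stated in full; the proofs are below) =====
def Claim_equal_parse_schema_string_py : Prop := ∀ (schema_str : String), Dom_parse_schema_string_py schema_str → Spec_parse_schema_string_py schema_str (parse_schema_string_py schema_str)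

-- ===== LEMMAS AND PROOFS =====

-- elements already present stay in Set.update
theorem mem_set_update (l : List String) (s : PySem.Set String) (x : String) (hx : x ∈ s) :
    x ∈ PySem.Set.update s l := by
  induction l generalizing s with
  | nil => exact hx
  | cons y l ih =>
    apply ih
    simp [PySem.Set.add]
    split
    · exact hx
    · exact List.mem_append_left _ hx

-- A's pop-based while loop computes Set.update of the (nodup) processed prefix with the rest
theorem pvLoopA_eq (lst : List String) (idx : Nat) (h : (lst.take idx).Nodup) :
    pvLoopA lst idx = PySem.Set.update (lst.take idx) (lst.drop idx) := by
  induction lst, idx using pvLoopA.induct with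
  | case1 lst idx hlt hc ih =>
    rw [pvLoopA]
    simp only [hlt, dif_pos, hc, if_pos]
    have hm : lst[idx] ∈ lst.take idx := by simpa using hc
    have e1 : lst.eraseIdx idx = lst.take idx ++ lst.drop (idx+1) :=
      List.eraseIdx_eq_take_drop_succ lst idx
    have hlen : (lst.take idx).length = idx := by simp [Nat.le_of_lt hlt]
    have ht : (lst.eraseIdx idx).take idx = lst.take idx := by
      rw [e1]; exact List.take_left' hlen
    have hd : (lst.eraseIdx idx).drop idx = lst.drop (idx+1) := by
      rw [e1]; exact List.drop_left' hlen
    rw [ih (by rw [ht]; exact h), ht, hd, List.drop_eq_getElem_cons hlt]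
    simp [PySem.Set.update, List.foldl, PySem.Set.add, hm]
  | case2 lst idx hlt hc ih =>
    rw [pvLoopA]
    simp only [hlt, dif_pos]
    rw [if_neg (by simpa using hc)]
    have hm : lst[idx] ∉ lst.take idx := by simpa using hc
    have htake : lst.take (idx+1) = lst.take idx ++ [lst[idx]] := by
      rw [List.take_add_one]; simp [hlt]
    have hnd : (lst.take (idx+1)).Nodup := by
      rw [htake, List.nodup_append]
      refine ⟨h, List.nodup_singleton _, ?_⟩
      intro a ha b hb
      simp only [List.mem_singleton] at hb
      subst hb
      exact fun e => hm (e ▸ ha)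
    rw [ih hnd, htake, List.drop_eq_getElem_cons hlt]
    simp [PySem.Set.update, List.foldl, PySem.Set.add, hm]
  | case3 lst idx hge =>
    rw [pvLoopA]
    rw [dif_neg hge]
    have hle : lst.length ≤ idx := by omega
    simp [PySem.Set.update, List.take_of_length_le hle, List.drop_of_length_le hle]

-- B's loop, entered with seen = result (all of whose names are valid), returns the canonical value
theorem pvLoopB_eq (ts : List String) (r : List String)
    (hv : ∀ x ∈ r, x.toList.all (fun c => pvQualifiedChars.contains c) = true) :
    pvLoopB ts r r =
      (let D := PySem.Set.update r (((ts.map pvNorm).filter (fun s => !(s == ""))));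
       if D.all (fun s => s.toList.all (fun c => pvQualifiedChars.contains c)) then some D else none) := by
  induction ts generalizing r with
  | nil =>
    simp only [pvLoopB, List.map_nil, List.filter_nil]
    have hall : (r.all (fun s => s.toList.all (fun c => pvQualifiedChars.contains c))) = true := by
      rw [List.all_eq_true]; exact fun x hx => hv x hx
    show some r = (if (List.foldl PySem.Set.add r []).all
        (fun s => s.toList.all (fun c => pvQualifiedChars.contains c)) then some _ else none)
    simp only [List.foldl, hall, if_true]
    rfl
  | cons t ts ih =>
    simp only [pvLoopB, List.map_cons, List.filter_cons]
    by_cases he : pvNorm t = ""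
    · simp only [he]
      simpa using ih r hv
    · have he' : (pvNorm t == "") = false := by simp [he]
      simp only [he', Bool.not_false, Bool.false_or, if_true]
      by_cases hcm : PySem.Set.contains r (pvNorm t) = true
      · -- duplicate: skipped on both sides
        have hmem : pvNorm t ∈ r := by simpa [PySem.Set.contains] using hcm
        rw [hcm]
        simp only [if_true]
        rw [ih r hv]
        simp [PySem.Set.update, PySem.Set.add, hmem]
      · have hcm' : PySem.Set.contains r (pvNorm t) = false := by
          cases hh : PySem.Set.contains r (pvNorm t) <;> simp_all
        have hnm : pvNorm t ∉ r := by simpa [PySem.Set.contains] using hcm'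
        have hadd : PySem.Set.add r (pvNorm t) = r ++ [pvNorm t] := by
          simp [PySem.Set.add, hnm]
        rw [hcm']
        simp only [Bool.false_eq_true, if_false]
        by_cases hvv : (pvNorm t).toList.all (fun c => pvQualifiedChars.contains c) = true
        · rw [if_pos hvv]
          have hv' : ∀ x ∈ r ++ [pvNorm t],
              x.toList.all (fun c => pvQualifiedChars.contains c) = true := by
            intro x hx
            rcases List.mem_append.mp hx with hx | hx
            · exact hv x hx
            · simp at hx; subst hx; exact hvv
          rw [hadd, ih (r ++ [pvNorm t]) hv']
          simp [PySem.Set.update, hadd]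
        · rw [if_neg hvv]
          have hmem : pvNorm t ∈ PySem.Set.update (PySem.Set.add r (pvNorm t))
              ((ts.map pvNorm).filter (fun s => !(s == ""))) := by
            apply mem_set_update
            rw [hadd]; simp
          have hfalse : ((PySem.Set.update (PySem.Set.add r (pvNorm t))
              ((ts.map pvNorm).filter (fun s => !(s == "")))).all
              (fun s => s.toList.all (fun c => pvQualifiedChars.contains c))) = false := by
            rw [List.all_eq_false]
            refine ⟨pvNorm t, hmem, ?_⟩
            have h2 := hvv
            simp only [List.all_eq_true] at h2
            push Not at h2
            obtain ⟨c, hc1, hc2⟩ := h2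
            simp only [List.all_eq_true, not_forall]
            exact ⟨c, hc1, by simpa using hc2⟩
          show (none : Option (List String)) = _
          simp only [PySem.Set.update] at hfalse ⊢
          rw [List.foldl_cons, hfalse]
          simp only [Bool.false_eq_true, if_false]

-- ===== VERDICT (by name: the statement is the Claim_ definition above) =====
theorem parse_schema_string_py_spec : Claim_equal_parse_schema_string_py := by
  intro schema_str _
  unfold Spec_parse_schema_string_py parse_schema_string_py parse_schema_string_py_alt
  have hB := pvLoopB_eq ((PySem.Str.split? schema_str ";").getD []) []
    (by intro x hx; simp at hx)
  simp only [PySem.Set.empty]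
  rw [hB]
  set names := ((((PySem.Str.split? schema_str ";").getD []).map pvNorm).filter
      (fun s => !(s == ""))) with hn
  have h1 : (names.take 1).Nodup := by
    cases names with
    | nil => simp
    | cons a l => simp [List.take]
  rw [pvLoopA_eq names 1 h1]
  have hD : PySem.Set.update (names.take 1) (names.drop 1) = PySem.Set.update [] names := by
    cases names with
    | nil => rfl
    | cons a l =>
      simp [PySem.Set.update, List.take, List.drop, List.foldl, PySem.Set.add]
  rw [hD]
  cases hall : ((PySem.Set.update [] names).all
      (fun s => s.toList.all (fun c => pvQualifiedChars.contains c))) <;>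
    simp only [hall, Bool.not_true, Bool.not_false, Bool.false_eq_true, if_false, if_true]
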